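-- pv_equiv track=rewrite | github.com/Carolina1018/MinTIC-UNAL | Ciclo1/Reto5/reto5.py | mefaltandelaclase
-- ===== SOURCE A (Python) =====
-- def mefaltandelaclase(faltan,clases,clase_tazo):
--     resp = []
--     posi = []
--     for i in range(len(clases)):
--         if clase_tazo == clases[i]:
--             posi.append(i)
--     for i in range(len(posi)):
--         if posi[i] in faltan:
--             resp.append(posi[i])
--     return resp
-- ===== SOURCE B (Python) =====
-- def mefaltandelaclase(faltan, clases, clase_tazo):
--     # Treat faltan as candidate indices: keep those that are valid positions
--     # whose class matches, deduplicate, and sort to restore ascending index order.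
--     n = len(clases)
--     hits = {x for x in faltan if 0 <= x < n and clases[x] == clase_tazo}
--     return sorted(hits)
-- ===== Notes on version B (the rewrite author's own statement) =====
-- stated objective: alternative
-- what changed: Instead of scanning clases for matching indices and then testing each against faltan, B iterates over faltan itself as candidate indices, keeps valid positions whose class matches, deduplicates with a set and sorts ascending.
import Mathlib
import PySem

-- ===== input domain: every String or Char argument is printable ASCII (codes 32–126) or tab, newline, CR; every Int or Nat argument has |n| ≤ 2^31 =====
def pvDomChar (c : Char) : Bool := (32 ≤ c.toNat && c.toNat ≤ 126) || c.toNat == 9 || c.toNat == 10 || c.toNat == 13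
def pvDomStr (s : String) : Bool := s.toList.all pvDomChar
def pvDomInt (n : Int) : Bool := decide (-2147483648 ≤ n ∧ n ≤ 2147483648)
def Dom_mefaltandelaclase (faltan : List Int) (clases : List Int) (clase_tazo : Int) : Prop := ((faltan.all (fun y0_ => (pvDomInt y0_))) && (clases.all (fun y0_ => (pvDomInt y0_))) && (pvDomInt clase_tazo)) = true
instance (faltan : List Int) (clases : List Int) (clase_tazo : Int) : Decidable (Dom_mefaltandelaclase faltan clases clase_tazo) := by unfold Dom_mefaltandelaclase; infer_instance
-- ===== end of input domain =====

-- B inverts A's traversal: instead of scanning clases for matching indices and testing each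
-- against faltan, it scans faltan as candidate indices, keeps valid matching positions,
-- deduplicates with a set and sorts ascending; same return value.

-- ===== PORT A =====
def mefaltandelaclase (faltan : List Int) (clases : List Int) (clase_tazo : Int) : List Int :=
  -- resp = []; posi = []
  -- for i in range(len(clases)): if clase_tazo == clases[i]: posi.append(i)
  let posi : List Int :=
    (PySem.List.pyRange 0 (PySem.List.len clases)).foldl
      (fun acc i => if clase_tazo = PySem.List.pyGetD clases i 0 then acc ++ [i] else acc) []
  -- for i in range(len(posi)): if posi[i] in faltan: resp.append(posi[i])
  (PySem.List.pyRange 0 (PySem.List.len posi)).foldl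
    (fun acc i => if PySem.List.pyGetD posi i 0 ∈ faltan then acc ++ [PySem.List.pyGetD posi i 0] else acc) []

-- ===== PORT B =====
def mefaltandelaclase_alt (faltan : List Int) (clases : List Int) (clase_tazo : Int) : List Int :=
  let n : Int := PySem.List.len clases
  -- hits = {x for x in faltan if 0 <= x < n and clases[x] == clase_tazo}
  let hits : PySem.Set Int :=
    PySem.Set.ofList (faltan.filter
      (fun x => decide (0 ≤ x) && decide (x < n) && (PySem.List.pyGetD clases x 0 == clase_tazo)))
  -- return sorted(hits)
  PySem.List.sorted hits (fun x => x) false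

-- ===== PRECONDITION & SPEC =====
def Spec_mefaltandelaclase (faltan : List Int) (clases : List Int) (clase_tazo : Int) (out : List Int) : Prop := out = mefaltandelaclase_alt faltan clases clase_tazo
instance (faltan : List Int) (clases : List Int) (clase_tazo : Int) (out : List Int) : Decidable (Spec_mefaltandelaclase faltan clases clase_tazo out) := by unfold Spec_mefaltandelaclase; infer_instance

-- ===== CLAIM (what is proved, stated in full; the proofs are below) =====
def Claim_equal_mefaltandelaclase : Prop := ∀ (faltan : List Int) (clases : List Int) (clase_tazo : Int), Dom_mefaltandelaclase faltan clases clase_tazo → Spec_mefaltandelaclase faltan clases clase_tazo (mefaltandelaclase faltan clases clase_tazo)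

-- ===== LEMMAS AND PROOFS =====

-- A computes: the indices 0..n-1 with matching class, in order, filtered by membership in faltan.
theorem mefaltandelaclase_eq_filter_range (faltan clases : List Int) (clase_tazo : Int) :
    mefaltandelaclase faltan clases clase_tazo
    = (PySem.List.pyRange 0 (PySem.List.len clases)).filter
        (fun i => decide (clase_tazo = PySem.List.pyGetD clases i 0) && decide (i ∈ faltan)) := by
  unfold mefaltandelaclase
  rw [PySem.List.foldl_append_ite_eq_filter
        (p := fun i => clase_tazo = PySem.List.pyGetD clases i 0)]
  rw [PySem.List.foldl_pyRange_pyGetD _ 0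
        (fun acc x => if x ∈ faltan then acc ++ [x] else acc) [] (by norm_num)]
  simp [PySem.List.foldl_append_ite_eq_filter, List.filter_filter, Bool.and_comm]

-- Elementwise characterisation of A's output list.
theorem mem_mefaltandelaclase (faltan clases : List Int) (clase_tazo x : Int) :
    x ∈ mefaltandelaclase faltan clases clase_tazo ↔
      (0 ≤ x ∧ x < PySem.List.len clases) ∧
        clase_tazo = PySem.List.pyGetD clases x 0 ∧ x ∈ faltan := by
  rw [mefaltandelaclase_eq_filter_range]
  simp [List.mem_filter, PySem.List.mem_pyRange_one, and_assoc]

theorem nodup_mefaltandelaclase (faltan clases : List Int) (clase_tazo : Int) :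
    (mefaltandelaclase faltan clases clase_tazo).Nodup := by
  rw [mefaltandelaclase_eq_filter_range]
  exact (PySem.List.nodup_pyRange_one 0 _).filter _

theorem pairwise_lt_mefaltandelaclase (faltan clases : List Int) (clase_tazo : Int) :
    (mefaltandelaclase faltan clases clase_tazo).Pairwise (· < ·) := by
  rw [mefaltandelaclase_eq_filter_range]
  exact (PySem.List.pairwise_lt_pyRange_one 0 _).filter _

-- ===== VERDICT (by name: the statement is the Claim_ definition above) =====
theorem mefaltandelaclase_spec : Claim_equal_mefaltandelaclase := by
  intro faltan clases clase_tazo _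
  unfold Spec_mefaltandelaclase mefaltandelaclase_alt
  refine (PySem.List.sorted_eq_of_perm_of_pairwise_lt _ _ (fun x => x) ?_ ?_).symm
  · -- A's output is a permutation of the deduplicated filtered faltan
    refine (List.perm_ext_iff_of_nodup (nodup_mefaltandelaclase _ _ _)
      (PySem.Set.nodup_ofList _)).mpr ?_
    intro x
    rw [mem_mefaltandelaclase, PySem.Set.mem_ofList, List.mem_filter]
    simp only [Bool.and_eq_true, decide_eq_true_eq, beq_iff_eq, PySem.List.len]
    constructor
    · rintro ⟨⟨h0, h1⟩, h2, h3⟩; exact ⟨h3, ⟨h0, h1⟩, h2.symm⟩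
    · rintro ⟨h3, ⟨h0, h1⟩, h2⟩; exact ⟨⟨h0, h1⟩, h2.symm, h3⟩
  · exact pairwise_lt_mefaltandelaclase faltan clases clase_tazo
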